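-- pv_equiv track=rewrite | github.com/brunomendesdecarvalho/avaliacao-fim-de-disciplina | ATIVIDADE_FIM_DE_DISCIPLINA_PT2_BRUNO_MENDES/utils.py | vetor_filtrar_entre
-- ===== SOURCE A (Python) =====
-- def vetor_novo_vetor(tamanho):
--     return [0] * tamanho
--
-- def vetor_filtrar_entre(vetor, min, max):
--     entre_numeros = 0
--     for i in vetor:
--         if min < i < max:
--             entre_numeros += 1
--         else:
--             pass
--
--     cont = 0
--     novo_vetor = vetor_novo_vetor(entre_numeros)
--
--     while cont < entre_numeros:
--         for i in vetor:
--             if min < i < max: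
--                 novo_vetor[cont] = i
--                 cont += 1
--             else:
--                 pass
--
--     return novo_vetor
-- ===== SOURCE B (Python) =====
-- def vetor_filtrar_entre(vetor, min, max):
--     return [i for i in vetor if min < i < max]
-- ===== Notes on version B (the rewrite author's own statement) =====
-- stated objective: simpler
-- what changed: Replaces A's two-pass count-then-preallocate-zeros-then-fill-by-index (with an outer while around a full re-scan) by a single build pass: one list comprehension that appends each element strictly between min and max.
import Mathlib
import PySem

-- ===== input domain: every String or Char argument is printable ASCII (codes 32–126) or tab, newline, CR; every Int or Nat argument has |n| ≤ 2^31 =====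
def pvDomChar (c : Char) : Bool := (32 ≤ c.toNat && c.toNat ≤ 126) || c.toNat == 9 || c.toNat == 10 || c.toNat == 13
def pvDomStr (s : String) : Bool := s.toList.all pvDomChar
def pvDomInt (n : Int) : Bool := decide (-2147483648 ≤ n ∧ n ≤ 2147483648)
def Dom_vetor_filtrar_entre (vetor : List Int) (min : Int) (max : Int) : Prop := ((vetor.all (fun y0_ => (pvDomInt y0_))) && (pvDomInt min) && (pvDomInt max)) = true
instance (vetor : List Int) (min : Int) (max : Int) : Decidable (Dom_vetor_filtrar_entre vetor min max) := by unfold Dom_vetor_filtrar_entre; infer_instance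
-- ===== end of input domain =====

-- B replaces A's count-pass + preallocated zero list + index-filling while/for by a single
-- filtering pass (list comprehension); objective: simpler.

-- ===== PORT A =====
-- helper from the same module: [0] * tamanho
def vetor_novo_vetor (tamanho : Int) : List Int := List.replicate tamanho.toNat 0

-- one full 'for i in vetor' pass of the filling loop, over state (novo_vetor, cont)
def pvFillPass (vetor : List Int) (min max : Int) (st : List Int × Int) : List Int × Int :=
  vetor.foldl (fun st i => if min < i ∧ i < max then (st.1.set st.2.toNat i, st.2 + 1) else st) st

-- the 'while cont < entre_numeros' loop (fuel makes the same computation total)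
def pvWhile (vetor : List Int) (min max entre : Int) : Nat → List Int × Int → List Int
  | 0, st => st.1
  | fuel + 1, st =>
      if st.2 < entre then pvWhile vetor min max entre fuel (pvFillPass vetor min max st)
      else st.1

def vetor_filtrar_entre (vetor : List Int) (min : Int) (max : Int) : List Int :=
  let entre_numeros := vetor.foldl (fun c i => if min < i ∧ i < max then c + 1 else c) 0
  let novo_vetor := vetor_novo_vetor entre_numeros
  pvWhile vetor min max entre_numeros (entre_numeros.toNat + 1) (novo_vetor, 0)

-- ===== PORT B =====
def vetor_filtrar_entre_alt (vetor : List Int) (min : Int) (max : Int) : List Int :=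
  vetor.filter (fun i => decide (min < i ∧ i < max))

-- ===== PRECONDITION & SPEC =====
def Spec_vetor_filtrar_entre (vetor : List Int) (min : Int) (max : Int) (out : List Int) : Prop := out = vetor_filtrar_entre_alt vetor min max
instance (vetor : List Int) (min : Int) (max : Int) (out : List Int) : Decidable (Spec_vetor_filtrar_entre vetor min max out) := by unfold Spec_vetor_filtrar_entre; infer_instance

-- ===== CLAIM (what is proved, stated in full; the proofs are below) =====
def Claim_equal_vetor_filtrar_entre : Prop := ∀ (vetor : List Int) (min : Int) (max : Int), Dom_vetor_filtrar_entre vetor min max → Spec_vetor_filtrar_entre vetor min max (vetor_filtrar_entre vetor min max)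

-- ===== LEMMAS AND PROOFS =====

theorem pv_count_eq (min max : Int) :
    ∀ (xs : List Int) (c : Int),
      xs.foldl (fun c i => if min < i ∧ i < max then c + 1 else c) c
        = c + ((xs.filter (fun i => decide (min < i ∧ i < max))).length : Int) := by
  intro xs
  induction xs with
  | nil => intro c; simp
  | cons x xs ih =>
      intro c
      by_cases h : min < x ∧ x < max
      · simp [List.foldl, List.filter, h, ih]; ring
      · simp [List.foldl, List.filter, h, ih]

theorem pv_fill_eq (min max : Int) :
    ∀ (xs : List Int) (done : List Int),
      pvFillPass xs min max
        (done ++ List.replicate (xs.filter (fun i => decide (min < i ∧ i < max))).length 0,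
         (done.length : Int))
        = (done ++ xs.filter (fun i => decide (min < i ∧ i < max)),
           (done.length : Int) + ((xs.filter (fun i => decide (min < i ∧ i < max))).length : Int)) := by
  intro xs
  induction xs with
  | nil => intro done; simp [pvFillPass]
  | cons x xs ih =>
      intro done
      by_cases h : min < x ∧ x < max
      · have hf : (x :: xs).filter (fun i => decide (min < i ∧ i < max))
            = x :: xs.filter (fun i => decide (min < i ∧ i < max)) := by simp [List.filter, h]
        rw [hf]
        simp only [pvFillPass, List.foldl, if_pos h, List.length_cons, List.replicate_succ]
        have hset :
            (done ++ 0 :: List.replicate (xs.filter (fun i => decide (min < i ∧ i < max))).length 0).set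
              ((done.length : Int)).toNat x
            = (done ++ [x]) ++ List.replicate (xs.filter (fun i => decide (min < i ∧ i < max))).length 0 := by
          rw [Int.toNat_natCast, List.set_append]
          simp
        rw [hset]
        have hlen : ((done ++ [x]).length : Int) = (done.length : Int) + 1 := by simp
        have := ih (done ++ [x])
        rw [← hlen]
        simp only [pvFillPass] at this ⊢
        rw [this]
        simp
        ring
      · have hf : (x :: xs).filter (fun i => decide (min < i ∧ i < max))
            = xs.filter (fun i => decide (min < i ∧ i < max)) := by simp [List.filter, h]
        rw [hf]
        simp only [pvFillPass, List.foldl, h, if_neg, not_false_iff]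
        have := ih done
        simp only [pvFillPass] at this
        simpa using this

-- ===== VERDICT (by name: the statement is the Claim_ definition above) =====
theorem vetor_filtrar_entre_spec : Claim_equal_vetor_filtrar_entre := by
  unfold Claim_equal_vetor_filtrar_entre
  intro vetor min max _
  unfold Spec_vetor_filtrar_entre vetor_filtrar_entre vetor_filtrar_entre_alt
  set f := vetor.filter (fun i => decide (min < i ∧ i < max)) with hf
  have hcount :
      vetor.foldl (fun c i => if min < i ∧ i < max then c + 1 else c) 0 = (f.length : Int) := by
    rw [pv_count_eq]; simp [hf]
  simp only [hcount, vetor_novo_vetor, Int.toNat_natCast]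
  have hfill := pv_fill_eq min max vetor []
  simp only [List.nil_append, List.length_nil, Nat.cast_zero, ← hf] at hfill
  rw [zero_add] at hfill
  by_cases h0 : f.length = 0
  · have hfe : f = [] := List.length_eq_zero_iff.mp h0
    simp [pvWhile, hfe]
  · obtain ⟨k, hk⟩ := Nat.exists_eq_succ_of_ne_zero h0
    rw [pvWhile, if_pos (show (List.replicate f.length (0:Int), (0:Int)).2 < (f.length:Int) by show (0:Int) < (f.length:Int); exact_mod_cast Nat.pos_of_ne_zero h0), hfill, hk, pvWhile,
      if_neg (lt_irrefl _)]
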